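-- pv_equiv track=rewrite | github.com/THU-KEG/OmniEvent | OmniEvent/input_engineering/seq2seq_processor.py | insert_marker
-- ===== SOURCE A (Python) =====
-- from typing import List, Union, Tuple, Optional
--
-- def insert_marker(tokens: List[str],
--                   trigger_pos: List[int],
--                   markers: List,
--                   whitespace: Optional[bool] = True) -> List[str]:
--     """Adds a marker at the start and end position of event triggers and argument mentions."""
--     space = " " if whitespace else ""
--     marked_words = []
--     char_pos = 0
--     for i, token in enumerate(tokens):
--         if char_pos == trigger_pos[0]:
--             marked_words.append(markers[0])
--         char_pos += len(token) + len(space)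
--         marked_words.append(token)
--         if char_pos == trigger_pos[1] + len(space):
--             marked_words.append(markers[1])
--     return marked_words
-- ===== SOURCE B (Python) =====
-- from typing import List, Optional
--
-- def insert_marker(tokens: List[str],
--                   trigger_pos: List[int],
--                   markers: List,
--                   whitespace: Optional[bool] = True) -> List[str]:
--     """Adds a marker at the start and end position of event triggers and argument mentions."""
--     step = 1 if whitespace else 0
--     offs = [0]
--     for t in tokens:
--         offs.append(offs[-1] + len(t) + step)
--     inserts = []
--     for i in range(len(tokens)):
--         if offs[i] == trigger_pos[0]:
--             inserts.append((i, markers[0]))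
--         if offs[i + 1] == trigger_pos[1] + step:
--             inserts.append((i + 1, markers[1]))
--     result = list(tokens)
--     for pos, m in reversed(inserts):
--         result.insert(pos, m)
--     return result
-- ===== Notes on version B (the rewrite author's own statement) =====
-- stated objective: alternative
-- what changed: A builds the output in one streaming pass with a running character-position accumulator; B precomputes the prefix-offset array, derives a list of (position, marker) insertions from it, and splices the markers into a copy of tokens back-to-front.
import Mathlib
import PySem

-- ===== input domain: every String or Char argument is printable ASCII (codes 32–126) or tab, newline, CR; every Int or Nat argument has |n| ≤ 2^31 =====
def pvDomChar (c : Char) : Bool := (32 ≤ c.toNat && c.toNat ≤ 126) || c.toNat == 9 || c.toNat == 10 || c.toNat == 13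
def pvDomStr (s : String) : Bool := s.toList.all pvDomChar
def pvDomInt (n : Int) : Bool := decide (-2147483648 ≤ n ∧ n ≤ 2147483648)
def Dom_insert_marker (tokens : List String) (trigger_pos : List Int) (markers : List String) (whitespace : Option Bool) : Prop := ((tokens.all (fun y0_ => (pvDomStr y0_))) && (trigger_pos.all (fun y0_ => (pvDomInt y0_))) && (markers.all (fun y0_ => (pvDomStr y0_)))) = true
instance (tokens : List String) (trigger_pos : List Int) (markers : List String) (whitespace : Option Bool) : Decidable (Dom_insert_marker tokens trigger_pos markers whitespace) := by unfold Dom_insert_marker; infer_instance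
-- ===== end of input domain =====

-- B replaces A's streaming accumulator loop by precomputed prefix offsets, a list of
-- (position, marker) insertions, and a back-to-front splice (objective: alternative decomposition).


-- ===== PORT A =====
-- Python truthiness: 'space = " " if whitespace else ""' — whitespace is truthy iff it is `some true`.
def insert_marker (tokens : List String) (trigger_pos : List Int) (markers : List String) (whitespace : Option Bool) : List String :=
  let space : String := if whitespace = some true then " " else ""
  (tokens.foldl (fun (st : List String × Int) (token : String) =>
      let mw1 := if some st.2 = PySem.List.pyGet? trigger_pos 0 then st.1 ++ [PySem.List.pyGetD markers 0 ""] else st.1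
      let cp := st.2 + PySem.Str.len token + PySem.Str.len space
      let mw2 := mw1 ++ [token]
      let mw3 := if some cp = (PySem.List.pyGet? trigger_pos 1).map (fun v => v + PySem.Str.len space) then mw2 ++ [PySem.List.pyGetD markers 1 ""] else mw2
      (mw3, cp)) (([] : List String), (0 : Int))).1

-- ===== PORT B =====
def insert_marker_alt (tokens : List String) (trigger_pos : List Int) (markers : List String) (whitespace : Option Bool) : List String :=
  let step : Int := if whitespace = some true then 1 else 0
  let offs : List Int := tokens.foldl (fun offs t => offs ++ [PySem.List.pyGetD offs (-1) 0 + PySem.Str.len t + step]) [0]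
  let inserts : List (Int × String) :=
    (PySem.List.pyRange 0 (PySem.List.len tokens) 1).foldl (fun ins i =>
      let ins1 := if PySem.List.pyGet? offs i = PySem.List.pyGet? trigger_pos 0
                  then ins ++ [(i, PySem.List.pyGetD markers 0 "")] else ins
      if PySem.List.pyGet? offs (i+1) = (PySem.List.pyGet? trigger_pos 1).map (fun v => v + step)
      then ins1 ++ [(i+1, PySem.List.pyGetD markers 1 "")] else ins1) []
  inserts.reverse.foldl (fun result pm => PySem.List.insert result pm.1 pm.2) tokens

-- ===== PRECONDITION & SPEC =====
-- Pre_ is exactly the set of inputs on which the Python A returns normally: with tokens non-empty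
-- A always reads trigger_pos[0] and trigger_pos[1] (IndexError if len < 2), and it reads markers[0]
-- (resp. markers[1]) exactly when some prefix-offset matches trigger_pos[0] (resp. the end condition).
def Pre_insert_marker (tokens : List String) (trigger_pos : List Int) (markers : List String) (whitespace : Option Bool) : Prop :=
  tokens = [] ∨
    (2 ≤ trigger_pos.length ∧
      ((∃ j ∈ List.range tokens.length,
          ((tokens.take j).map (fun t => (t.length : Int) + (if whitespace = some true then 1 else 0))).sum
            = trigger_pos.getD 0 0) → 1 ≤ markers.length) ∧
      ((∃ j ∈ List.range tokens.length,
          ((tokens.take (j+1)).map (fun t => (t.length : Int) + (if whitespace = some true then 1 else 0))).sum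
            = trigger_pos.getD 1 0 + (if whitespace = some true then 1 else 0)) → 2 ≤ markers.length))
instance (tokens : List String) (trigger_pos : List Int) (markers : List String) (whitespace : Option Bool) : Decidable (Pre_insert_marker tokens trigger_pos markers whitespace) := by unfold Pre_insert_marker; infer_instance

def pvWitness_insert_marker : List String × List Int × List String × Option Bool :=
  (["hello", "world"], [0, 11], ["<t>", "</t>"], some true)

def Spec_insert_marker (tokens : List String) (trigger_pos : List Int) (markers : List String) (whitespace : Option Bool) (out : List String) : Prop := out = insert_marker_alt tokens trigger_pos markers whitespace
instance (tokens : List String) (trigger_pos : List Int) (markers : List String) (whitespace : Option Bool) (out : List String) : Decidable (Spec_insert_marker tokens trigger_pos markers whitespace out) := by unfold Spec_insert_marker; infer_instance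

-- ===== CLAIM (what is proved, stated in full; the proofs are below) =====
def Claim_equal_insert_marker : Prop := ∀ (tokens : List String) (trigger_pos : List Int) (markers : List String) (whitespace : Option Bool), Dom_insert_marker tokens trigger_pos markers whitespace → Pre_insert_marker tokens trigger_pos markers whitespace → Spec_insert_marker tokens trigger_pos markers whitespace (insert_marker tokens trigger_pos markers whitespace)

-- ===== LEMMAS AND PROOFS =====

-- Common shape of the marked output: for each token, the optional start marker, the token,
-- the optional end marker, continuing at the advanced character position.
def pvSeg (tp0 e1 : Option Int) (m0 m1 : String) (st : Int) : List String → Int → List String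
  | [], _ => []
  | t :: ts, cp =>
      (if some cp = tp0 then [m0] else []) ++
        t :: ((if some (cp + PySem.Str.len t + st) = e1 then [m1] else []) ++
          pvSeg tp0 e1 m0 m1 st ts (cp + PySem.Str.len t + st))

-- A's fold produces pvSeg.
theorem pvA_fold (tp0 e1 : Option Int) (m0 m1 : String) (st : Int) :
    ∀ (ts : List String) (acc : List String) (cp : Int),
      ts.foldl (fun (s : List String × Int) (token : String) =>
          let mw1 := if some s.2 = tp0 then s.1 ++ [m0] else s.1
          let cp' := s.2 + PySem.Str.len token + st
          let mw2 := mw1 ++ [token]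
          let mw3 := if some cp' = e1 then mw2 ++ [m1] else mw2
          (mw3, cp')) (acc, cp)
        = (acc ++ pvSeg tp0 e1 m0 m1 st ts cp,
           cp + ((ts.map (fun t => PySem.Str.len t + st)).sum)) := by
  intro ts
  induction ts with
  | nil => intro acc cp; simp [pvSeg]
  | cons t ts ih =>
      intro acc cp
      simp only [List.foldl_cons, ih, pvSeg, List.map_cons, List.sum_cons, Prod.mk.injEq]
      refine ⟨?_, by ring⟩
      split_ifs <;> simp

-- B's offsets list.
def pvOffs (st : Int) : Int → List String → List Int
  | c, [] => [c]
  | c, t :: ts => c :: pvOffs st (c + PySem.Str.len t + st) ts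

theorem pvOffs_fold (st : Int) :
    ∀ (ts : List String) (pre : List Int) (c : Int),
      ts.foldl (fun offs t => offs ++ [PySem.List.pyGetD offs (-1) 0 + PySem.Str.len t + st]) (pre ++ [c])
        = pre ++ pvOffs st c ts := by
  intro ts
  induction ts with
  | nil => intro pre c; simp [pvOffs]
  | cons t ts ih =>
      intro pre c
      simp only [List.foldl_cons, PySem.List.pyGetD_neg_one_append_singleton]
      have := ih (pre ++ [c]) (c + PySem.Str.len t + st)
      simpa [pvOffs] using this

theorem pvOffs_get_zero (st : Int) (c : Int) (ts : List String) :
    PySem.List.pyGet? (pvOffs st c ts) 0 = some c := by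
  cases ts <;> simp [pvOffs]

theorem pvOffs_get_succ (st : Int) (c : Int) (t : String) (ts : List String) (j : Nat) :
    PySem.List.pyGet? (pvOffs st c (t :: ts)) ((j : Int) + 1)
      = PySem.List.pyGet? (pvOffs st (c + PySem.Str.len t + st) ts) (j : Int) := by
  simp [pvOffs, PySem.List.pyGet?_cons_succ]

-- B's insertion list: absolute positions a, a+1, … paired with markers.
def pvIns (tp0 e1 : Option Int) (m0 m1 : String) (st : Int) : List String → Int → Int → List (Int × String)
  | [], _, _ => []
  | t :: ts, cp, a =>
      (if some cp = tp0 then [(a, m0)] else []) ++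
      ((if some (cp + PySem.Str.len t + st) = e1 then [(a + 1, m1)] else []) ++
        pvIns tp0 e1 m0 m1 st ts (cp + PySem.Str.len t + st) (a + 1))

theorem pvIns_fold (tp0 e1 : Option Int) (m0 m1 : String) (st : Int) (o : List Int) :
    ∀ (ts : List String) (c a : Int) (acc : List (Int × String)),
      (∀ j : Nat, j ≤ ts.length → PySem.List.pyGet? o (a + (j : Int)) = PySem.List.pyGet? (pvOffs st c ts) (j : Int)) →
      (PySem.List.pyRange a (a + ts.length) 1).foldl
        (fun ins i =>
          let ins1 := if PySem.List.pyGet? o i = tp0 then ins ++ [(i, m0)] else ins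
          if PySem.List.pyGet? o (i + 1) = e1 then ins1 ++ [(i + 1, m1)] else ins1) acc
        = acc ++ pvIns tp0 e1 m0 m1 st ts c a := by
  intro ts
  induction ts with
  | nil =>
      intro c a acc h
      simp only [List.length_nil, Nat.cast_zero, add_zero]
      rw [PySem.List.pyRange_one_eq_nil le_rfl]
      simp [pvIns]
  | cons t ts ih =>
      intro c a acc h
      have h0 : PySem.List.pyGet? o a = some c := by
        have := h 0 (by simp)
        simpa [pvOffs_get_zero] using this
      have h1 : PySem.List.pyGet? o (a + 1) = some (c + PySem.Str.len t + st) := by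
        have := h 1 (by simp)
        rw [show ((1 : Nat) : Int) = ((0 : Nat) : Int) + 1 by norm_num] at this
        rw [pvOffs_get_succ] at this
        simpa [pvOffs_get_zero] using this
      have hcons : PySem.List.pyRange a (a + (((t :: ts).length : Nat) : Int)) 1
          = a :: PySem.List.pyRange (a + 1) ((a + 1) + ((ts.length : Nat) : Int)) 1 := by
        rw [List.length_cons, PySem.List.pyRange_one_cons (by push_cast; omega)]
        congr 1
        push_cast; ring
      rw [hcons]
      simp only [List.foldl_cons, h0, h1]
      have h' : ∀ j : Nat, j ≤ ts.length →
          PySem.List.pyGet? o ((a + 1) + (j : Int))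
            = PySem.List.pyGet? (pvOffs st (c + PySem.Str.len t + st) ts) (j : Int) := by
        intro j hj
        have := h (j + 1) (by simpa using Nat.succ_le_succ hj)
        rw [show (((j + 1 : Nat)) : Int) = (j : Int) + 1 by push_cast; ring] at this
        rw [pvOffs_get_succ] at this
        rw [show a + ((j : Int) + 1) = (a + 1) + (j : Int) by ring] at this
        exact this
      rw [ih (c + PySem.Str.len t + st) (a + 1) _ h']
      simp only [pvIns]
      split_ifs <;> simp

-- shifted insertion positions
theorem pvIns_shift (tp0 e1 : Option Int) (m0 m1 : String) (st : Int) :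
    ∀ (ts : List String) (c a : Int),
      pvIns tp0 e1 m0 m1 st ts c (a + 1)
        = (pvIns tp0 e1 m0 m1 st ts c a).map (fun pm => (pm.1 + 1, pm.2)) := by
  intro ts
  induction ts with
  | nil => intro c a; simp [pvIns]
  | cons t ts ih =>
      intro c a
      simp only [pvIns, List.map_append, ih]
      split_ifs <;> simp

theorem pvIns_nonneg (tp0 e1 : Option Int) (m0 m1 : String) (st : Int) :
    ∀ (ts : List String) (c a : Int), 0 ≤ a → ∀ pm ∈ pvIns tp0 e1 m0 m1 st ts c a, 0 ≤ pm.1 := by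
  intro ts
  induction ts with
  | nil => intro c a _ pm hpm; simp [pvIns] at hpm
  | cons t ts ih =>
      intro c a ha pm hpm
      simp only [pvIns, List.mem_append] at hpm
      rcases hpm with (hpm | hpm | hpm)
      · split_ifs at hpm <;> simp_all
      · split_ifs at hpm <;> simp_all
        omega
      · exact ih _ (a + 1) (by omega) pm hpm

-- the back-to-front splice
def pvApply (L : List String) (ins : List (Int × String)) : List String :=
  ins.reverse.foldl (fun r pm => PySem.List.insert r pm.1 pm.2) L

theorem pvApply_append (L : List String) (x y : List (Int × String)) :
    pvApply L (x ++ y) = pvApply (pvApply L y) x := by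
  simp [pvApply, List.foldl_append]

theorem pvInsert_cons {α : Type} (L : List α) (p : Int) (t v : α) (h : 0 ≤ p) :
    PySem.List.insert (t :: L) (p + 1) v = t :: PySem.List.insert L p v := by
  obtain ⟨n, rfl⟩ := Int.eq_ofNat_of_zero_le h
  simp only [PySem.List.insert, PySem.List.sliceIndices]
  norm_num
  rw [if_neg (by omega), if_neg (by omega)]
  rw [show (min (n : Int) (L.length : Int) + 1).toNat = (min (n : Int) (L.length : Int)).toNat + 1 by omega]
  simp

theorem pvApply_shift (ins : List (Int × String)) :
    ∀ (L : List String) (t : String), (∀ pm ∈ ins, 0 ≤ pm.1) →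
      pvApply (t :: L) (ins.map (fun pm => (pm.1 + 1, pm.2))) = t :: pvApply L ins := by
  induction ins using List.reverseRecOn with
  | nil => intro L t _; simp [pvApply]
  | append_singleton ins pm ih =>
      intro L t h
      have hp : 0 ≤ pm.1 := h pm (by simp)
      simp only [List.map_append, List.map_cons, List.map_nil, pvApply_append]
      have h1 : pvApply (t :: L) [(pm.1 + 1, pm.2)] = t :: PySem.List.insert L pm.1 pm.2 := by
        simp only [pvApply, List.reverse_singleton, List.foldl_cons, List.foldl_nil]
        exact pvInsert_cons L pm.1 t pm.2 hp
      have h2 : pvApply L [pm] = PySem.List.insert L pm.1 pm.2 := rfl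
      rw [h1, h2, ih (PySem.List.insert L pm.1 pm.2) t (fun q hq => h q (by simp [hq]))]

theorem pvInsert_one {α : Type} (L : List α) (t v : α) :
    PySem.List.insert (t :: L) 1 v = t :: v :: L := by
  have h := pvInsert_cons L 0 t v le_rfl
  rw [PySem.List.insert_zero] at h
  simpa using h

theorem pvApply_ins_eq_seg (tp0 e1 : Option Int) (m0 m1 : String) (st : Int) :
    ∀ (ts : List String) (c : Int),
      pvApply ts (pvIns tp0 e1 m0 m1 st ts c 0) = pvSeg tp0 e1 m0 m1 st ts c := by
  intro ts
  induction ts with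
  | nil => intro c; simp [pvIns, pvSeg, pvApply]
  | cons t ts ih =>
      intro c
      simp only [pvIns, pvSeg]
      rw [pvApply_append, pvApply_append]
      rw [pvIns_shift]
      rw [pvApply_shift _ ts t (pvIns_nonneg tp0 e1 m0 m1 st ts _ 0 le_rfl)]
      rw [ih]
      split_ifs <;>
        simp [pvApply, pvInsert_one, PySem.List.insert_zero]

theorem pvA_eq_seg (tokens : List String) (trigger_pos : List Int) (markers : List String) (whitespace : Option Bool) :
    insert_marker tokens trigger_pos markers whitespace
      = pvSeg (PySem.List.pyGet? trigger_pos 0)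
          ((PySem.List.pyGet? trigger_pos 1).map (fun v => v + (if whitespace = some true then 1 else 0)))
          (PySem.List.pyGetD markers 0 "") (PySem.List.pyGetD markers 1 "")
          (if whitespace = some true then 1 else 0) tokens 0 := by
  have hlen : ((if whitespace = some true then " " else "" : String).length : Int)
      = (if whitespace = some true then (1 : Int) else 0) := by
    split_ifs <;> rfl
  have h := pvA_fold (PySem.List.pyGet? trigger_pos 0)
      ((PySem.List.pyGet? trigger_pos 1).map (fun v => v + (if whitespace = some true then (1 : Int) else 0)))
      (PySem.List.pyGetD markers 0 "") (PySem.List.pyGetD markers 1 "")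
      (if whitespace = some true then (1 : Int) else 0) tokens [] 0
  simpa [insert_marker, hlen] using congrArg Prod.fst h

theorem pvB_eq_seg (tokens : List String) (trigger_pos : List Int) (markers : List String) (whitespace : Option Bool) :
    insert_marker_alt tokens trigger_pos markers whitespace
      = pvSeg (PySem.List.pyGet? trigger_pos 0)
          ((PySem.List.pyGet? trigger_pos 1).map (fun v => v + (if whitespace = some true then 1 else 0)))
          (PySem.List.pyGetD markers 0 "") (PySem.List.pyGetD markers 1 "")
          (if whitespace = some true then 1 else 0) tokens 0 := by
  have hoffs := pvOffs_fold (if whitespace = some true then (1 : Int) else 0) tokens [] 0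
  simp only [List.nil_append] at hoffs
  have hins := pvIns_fold (PySem.List.pyGet? trigger_pos 0)
      ((PySem.List.pyGet? trigger_pos 1).map (fun v => v + (if whitespace = some true then (1 : Int) else 0)))
      (PySem.List.pyGetD markers 0 "") (PySem.List.pyGetD markers 1 "")
      (if whitespace = some true then (1 : Int) else 0)
      (pvOffs (if whitespace = some true then (1 : Int) else 0) 0 tokens) tokens 0 0 []
      (by intro j hj; rw [zero_add])
  simp only [zero_add, List.nil_append] at hins
  have happ := pvApply_ins_eq_seg (PySem.List.pyGet? trigger_pos 0)
      ((PySem.List.pyGet? trigger_pos 1).map (fun v => v + (if whitespace = some true then (1 : Int) else 0)))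
      (PySem.List.pyGetD markers 0 "") (PySem.List.pyGetD markers 1 "")
      (if whitespace = some true then (1 : Int) else 0) tokens 0
  simp only [insert_marker_alt, PySem.List.len_eq]
  rw [hoffs, hins]
  exact happ

-- ===== VERDICT (by name: the statement is the Claim_ definition above) =====
theorem insert_marker_spec : Claim_equal_insert_marker := by
  intro tokens trigger_pos markers whitespace _ _
  unfold Spec_insert_marker
  rw [pvA_eq_seg, pvB_eq_seg]
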